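-- pv_equiv track=rewrite | github.com/WhyzeByte/starry-lyfe | tests/unit/test_residue_grep.py | _get_normalization_notes_lines
-- ===== SOURCE A (Python) =====
-- def _get_normalization_notes_lines(lines: list[str]) -> set[int]:
--     """Return set of 0-based line indices inside normalization_notes: YAML blocks.
--
--     normalization_notes blocks document RESOLVED legacy drift artifacts.
--     Their content references v7.0 tokens by design (audit trail of what was
--     fixed), so these lines must be excluded from the residue scan.
--
--     Phase 9 QA-1 closure + CLAUDE.md §16 highest-quality-default directive.
--     """
--     excluded: set[int] = set()
--     i = 0
--     while i < len(lines):
--         line = lines[i]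
--         stripped = line.lstrip()
--         if stripped.startswith("normalization_notes:"):
--             block_indent = len(line) - len(stripped)
--             excluded.add(i)
--             i += 1
--             while i < len(lines):
--                 if not lines[i].strip():
--                     excluded.add(i)
--                     i += 1
--                     continue
--                 current_indent = len(lines[i]) - len(lines[i].lstrip())
--                 if current_indent <= block_indent:
--                     break
--                 excluded.add(i)
--                 i += 1
--         else:
--             i += 1
--     return excluded
-- ===== SOURCE B (Python) =====
-- def _get_normalization_notes_lines(lines: list[str]) -> set[int]:
--     """Declarative reformulation: index i is excluded iff line i is itself a
--     normalization_notes: marker, or some earlier marker line m reaches i,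
--     i.e. every line after m up to and including i is blank or indented more
--     deeply than line m.  Each index is tested independently against this
--     characterization; there is no sequential block-scanning state at all."""
--     def indent(l):
--         return len(l) - len(l.lstrip())
--     def is_marker(l):
--         return l.lstrip().startswith("normalization_notes:")
--     def covered(i):
--         if is_marker(lines[i]):
--             return True
--         return any(
--             is_marker(lines[m])
--             and all(not lines[j].strip() or indent(lines[j]) > indent(lines[m])
--                     for j in range(m + 1, i + 1))
--             for m in range(i))
--     return {i for i in range(len(lines)) if covered(i)}
-- ===== Notes on version B (the rewrite author's own statement) =====
-- stated objective: alternative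
-- what changed: Replaced A's sequential two-level state machine (nested while loops sharing an index cursor) by a stateless declarative characterization: each index i is independently tested for being a marker line or being reachable from some earlier marker line m through only blank or deeper-indented lines, and the result is a set comprehension over range(len(lines)); this trades A's linear scan for a per-index reachability test.
import Mathlib
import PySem

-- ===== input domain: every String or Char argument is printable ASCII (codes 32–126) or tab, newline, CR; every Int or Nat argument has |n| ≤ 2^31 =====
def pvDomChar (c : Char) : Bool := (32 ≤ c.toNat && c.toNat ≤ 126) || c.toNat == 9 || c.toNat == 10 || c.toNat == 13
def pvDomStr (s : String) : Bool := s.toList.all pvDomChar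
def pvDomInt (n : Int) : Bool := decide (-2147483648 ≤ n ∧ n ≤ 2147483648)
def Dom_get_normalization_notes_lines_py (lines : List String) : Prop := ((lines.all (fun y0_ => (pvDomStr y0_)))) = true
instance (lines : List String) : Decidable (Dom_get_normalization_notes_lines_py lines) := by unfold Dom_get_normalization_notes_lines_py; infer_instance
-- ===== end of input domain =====

-- B replaces A's sequential two-level state machine (nested while loops with a
-- shared index) by a stateless declarative characterization: each index is tested
-- independently for being a marker or being reachable from an earlier marker
-- through only blank/deeper-indented lines (alternative decomposition, not faster).

-- shared tiny helpers (the same Python subexpressions appear in both programs)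
def pvIndent (l : String) : Int := (PySem.Str.len l : Int) - (PySem.Str.len (PySem.Str.lstrip l) : Int)
def pvIsMarker (l : String) : Bool := PySem.Str.startswith (PySem.Str.lstrip l) "normalization_notes:"

-- ===== PORT A =====
-- A's outer while loop (pvLoopA) and the inner block-consuming while loop (pvInnerA);
-- the inner 'break' returns control to the outer loop at the SAME index.
mutual
def pvLoopA : List String → Int → PySem.Set Int → PySem.Set Int
  | [], _, acc => acc
  | line :: rest, i, acc =>
    if pvIsMarker line then
      pvInnerA (pvIndent line) rest (i + 1) (PySem.Set.add acc i)
    else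
      pvLoopA rest (i + 1) acc
termination_by rest _ _ => 2 * rest.length
decreasing_by all_goals (simp [List.length_cons]; try omega)

def pvInnerA : Int → List String → Int → PySem.Set Int → PySem.Set Int
  | _, [], _, acc => acc
  | bi, l :: rest, i, acc =>
    if PySem.Str.strip l = "" then
      pvInnerA bi rest (i + 1) (PySem.Set.add acc i)
    else if pvIndent l ≤ bi then
      pvLoopA (l :: rest) i acc
    else
      pvInnerA bi rest (i + 1) (PySem.Set.add acc i)
termination_by _ rest _ _ => 2 * rest.length + 1
decreasing_by all_goals (simp [List.length_cons]; try omega)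
end

def get_normalization_notes_lines_py (lines : List String) : List Int :=
  pvLoopA lines 0 PySem.Set.empty

-- ===== PORT B =====
-- B's per-index membership test: covered(i) = marker(i) or
-- any(marker(m) and all lines in (m, i] blank or deeper than m, for m in range(i)).
def pvCoveredB (lines : List String) (i : Nat) : Bool :=
  pvIsMarker (lines.getD i "") ||
  (List.range i).any (fun m =>
    pvIsMarker (lines.getD m "") &&
    (List.range' (m + 1) (i - m)).all (fun j =>
      (PySem.Str.strip (lines.getD j "") == "") ||
      decide (pvIndent (lines.getD m "") < pvIndent (lines.getD j ""))))

-- the set comprehension {i for i in range(n) if covered(i)}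
def get_normalization_notes_lines_py_alt (lines : List String) : List Int :=
  PySem.Set.ofList (((List.range lines.length).filter (pvCoveredB lines)).map (fun (i : Nat) => (i : Int)))

-- ===== PRECONDITION & SPEC =====
def Spec_get_normalization_notes_lines_py (lines : List String) (out : List Int) : Prop := out = get_normalization_notes_lines_py_alt lines
instance (lines : List String) (out : List Int) : Decidable (Spec_get_normalization_notes_lines_py lines out) := by unfold Spec_get_normalization_notes_lines_py; infer_instance

-- ===== CLAIM (what is proved, stated in full; the proofs are below) =====
def Claim_equal_get_normalization_notes_lines_py : Prop := ∀ (lines : List String), Dom_get_normalization_notes_lines_py lines → Spec_get_normalization_notes_lines_py lines (get_normalization_notes_lines_py lines)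

-- ===== LEMMAS AND PROOFS =====

-- a marker line is not blank
theorem pv_marker_nonblank_chars (s : List Char)
    (h : PySem.Chars.startswith (PySem.Chars.lstrip s) "normalization_notes:".toList = true) :
    PySem.Chars.strip s ≠ [] := by
  have hpre := (PySem.Chars.startswith_iff _ _).1 h
  intro hnil
  have hr : ((PySem.Chars.lstrip s).reverse.dropWhile PySem.Chars.isspace).reverse = [] := hnil
  rcases hpre with ⟨t, ht⟩
  cases hls : PySem.Chars.lstrip s with
  | nil => rw [hls] at ht; simp at ht
  | cons c cs =>
    rw [hls] at ht hr
    have hc : 'n' = c := by simpa using congrArg List.head? ht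
    have hall : ∀ x ∈ (c :: cs).reverse, PySem.Chars.isspace x = true := by
      apply List.dropWhile_eq_nil_iff.1
      simpa using congrArg List.reverse hr
    have := hall c (by simp)
    rw [← hc] at this
    exact absurd this (by decide)

theorem pv_marker_nonblank (l : String) (h : pvIsMarker l = true) : PySem.Str.strip l ≠ "" := by
  intro hb
  exact pv_marker_nonblank_chars l.toList (by simpa [pvIsMarker] using h)
    (by simpa using congrArg String.toList hb)

-- the chain condition: every line strictly between m and k (inclusive of k) is blank or deeper than m
def pvChain (L : List String) (m k : Nat) : Prop :=
  ∀ j : Nat, m < j → j ≤ k →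
    (PySem.Str.strip (L.getD j "") = "" ∨ pvIndent (L.getD m "") < pvIndent (L.getD j ""))

theorem pvChain_mono (L : List String) (m k k' : Nat) (hk : k' ≤ k) (h : pvChain L m k) : pvChain L m k' :=
  fun j h1 h2 => h j h1 (le_trans h2 hk)

theorem pvCoveredB_iff (L : List String) (i : Nat) :
    pvCoveredB L i = true ↔
      (pvIsMarker (L.getD i "") = true ∨
       ∃ m, m < i ∧ pvIsMarker (L.getD m "") = true ∧ pvChain L m i) := by
  unfold pvCoveredB pvChain
  simp only [Bool.or_eq_true, List.any_eq_true, List.mem_range, Bool.and_eq_true,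
    List.all_eq_true, List.mem_range'_1, beq_iff_eq, decide_eq_true_eq]
  constructor
  · rintro (h | ⟨m, hm, hmark, hall⟩)
    · exact Or.inl h
    · exact Or.inr ⟨m, hm, hmark, fun j h1 h2 => hall j ⟨by omega, by omega⟩⟩
  · rintro (h | ⟨m, hm, hmark, hch⟩)
    · exact Or.inl h
    · exact Or.inr ⟨m, hm, hmark, fun j hj => hch j (by omega) (by omega)⟩

def pvCanonFrom (L : List String) (k : Nat) : List Int :=
  ((List.range' k (L.length - k)).filter (pvCoveredB L)).map (fun (i : Nat) => (i : Int))

def pvInvOut (L : List String) (k : Nat) : Prop :=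
  ∀ m, m < k → pvIsMarker (L.getD m "") = true → pvChain L m (k - 1) →
    (PySem.Str.strip (L.getD k "") ≠ "" ∧ pvIndent (L.getD k "") ≤ pvIndent (L.getD m ""))

def pvInvIn (L : List String) (k : Nat) (bi : Int) : Prop :=
  (∃ m, m < k ∧ pvIsMarker (L.getD m "") = true ∧ pvIndent (L.getD m "") = bi ∧ pvChain L m (k - 1)) ∧
  (∀ m, m < k → pvIsMarker (L.getD m "") = true → pvChain L m (k - 1) → bi ≤ pvIndent (L.getD m ""))

theorem pv_set_add_not_mem (s : List Int) (x : Int) (h : x ∉ s) : PySem.Set.add s x = s ++ [x] := by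
  simp [PySem.Set.add, PySem.Set.contains, h]

theorem pvCanonFrom_cons_true (L : List String) (k : Nat) (hkn : k < L.length)
    (hc : pvCoveredB L k = true) : pvCanonFrom L k = (k : Int) :: pvCanonFrom L (k + 1) := by
  unfold pvCanonFrom
  have h1 : L.length - k = (L.length - (k + 1)) + 1 := by omega
  rw [h1, List.range'_succ, List.filter_cons]
  simp [hc]

theorem pvCanonFrom_cons_false (L : List String) (k : Nat) (hkn : k < L.length)
    (hc : pvCoveredB L k = false) : pvCanonFrom L k = pvCanonFrom L (k + 1) := by
  unfold pvCanonFrom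
  have h1 : L.length - k = (L.length - (k + 1)) + 1 := by omega
  rw [h1, List.range'_succ, List.filter_cons]
  simp [hc]

theorem pvMain (L : List String) (N : Nat) :
    (∀ (k : Nat) (acc : List Int), k ≤ L.length → 2 * (L.length - k) ≤ N →
      (∀ x ∈ acc, x < (k : Int)) → pvInvOut L k →
      pvLoopA (L.drop k) (k : Int) acc = acc ++ pvCanonFrom L k) ∧
    (∀ (k : Nat) (bi : Int) (acc : List Int), k ≤ L.length → 2 * (L.length - k) + 1 ≤ N →
      (∀ x ∈ acc, x < (k : Int)) → pvInvIn L k bi →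
      pvInnerA bi (L.drop k) (k : Int) acc = acc ++ pvCanonFrom L k) := by
  induction N using Nat.strong_induction_on with
  | _ N IH =>
  constructor
  · -- outer loop
    intro k acc hk hN hacc hinv
    by_cases hkn : k < L.length
    · have hdrop : L.drop k = L[k] :: L.drop (k + 1) := List.drop_eq_getElem_cons hkn
      have hgd : L.getD k "" = L[k] := List.getD_eq_getElem L "" hkn
      rw [hdrop, ← hgd]
      by_cases hm : pvIsMarker (L.getD k "") = true
      · -- marker line: enter the inner loop
        have hcov : pvCoveredB L k = true := (pvCoveredB_iff L k).2 (Or.inl hm)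
        simp only [pvLoopA, hm, if_true]
        rw [pv_set_add_not_mem acc (k : Int) (fun hx => absurd (hacc _ hx) (lt_irrefl _))]
        have hcast : ((k : Int) + 1) = ((k + 1 : Nat) : Int) := by push_cast; ring
        rw [hcast]
        have hinner := (IH (N - 1) (by omega)).2 (k + 1) (pvIndent (L.getD k "")) (acc ++ [(k : Int)])
          (by omega) (by omega)
          (by intro x hx
              rcases List.mem_append.1 hx with h | h
              · have := hacc x h; push_cast; omega
              · simp at h; subst h; push_cast; omega)
          (by constructor
              · exact ⟨k, by omega, hm, rfl, by intro j h1 h2; omega⟩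
              · intro m hm1 hmark hch
                simp only [Nat.add_sub_cancel] at hch
                rcases Nat.lt_or_ge m k with hlt | hge
                · have hch1 : pvChain L m (k - 1) := pvChain_mono L m k (k - 1) (by omega) hch
                  have h2 := hinv m hlt hmark hch1
                  rcases hch k (by omega) (le_refl k) with hb | hgt
                  · exact absurd hb h2.1
                  · exact absurd hgt (by omega)
                · have : m = k := by omega
                  subst this; exact le_refl _)
        rw [hinner, pvCanonFrom_cons_true L k hkn hcov, List.append_assoc]
        rfl
      · -- non-marker line, no active chain: skip
        have hm' : pvIsMarker (L.getD k "") = false := by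
          cases h : pvIsMarker (L.getD k "") with
          | false => rfl
          | true => exact absurd h hm
        have hnoch : ∀ m, m < k → pvIsMarker (L.getD m "") = true → pvChain L m k → False := by
          intro m hmk hmark hch
          have hch1 : pvChain L m (k - 1) := pvChain_mono L m k (k - 1) (by omega) hch
          have h2 := hinv m hmk hmark hch1
          rcases hch k (by omega) (le_refl k) with hb | hgt
          · exact absurd hb h2.1
          · exact absurd hgt (by omega)
        have hcov : pvCoveredB L k = false := by
          rw [Bool.eq_false_iff]
          intro hc
          rcases (pvCoveredB_iff L k).1 hc with h | ⟨m, hmk, hmark, hch⟩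
          · exact absurd h hm
          · exact hnoch m hmk hmark hch
        simp only [pvLoopA, hm', Bool.false_eq_true, if_false]
        have hcast : ((k : Int) + 1) = ((k + 1 : Nat) : Int) := by push_cast; ring
        rw [hcast]
        have houter := (IH (N - 1) (by omega)).1 (k + 1) acc (by omega) (by omega)
          (by intro x hx; have := hacc x hx; push_cast; omega)
          (by intro m hm1 hmark hch
              simp only [Nat.add_sub_cancel] at hch
              rcases Nat.lt_or_ge m k with hlt | hge
              · exact absurd hch (fun h => hnoch m hlt hmark h)
              · have : m = k := by omega
                subst this; exact absurd hmark hm)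
        rw [houter, pvCanonFrom_cons_false L k hkn hcov]
    · -- k = length: loop ends
      have hke : k = L.length := by omega
      rw [List.drop_eq_nil_iff.2 (by omega)]
      simp [pvLoopA, pvCanonFrom, hke]
  · -- inner loop
    intro k bi acc hk hN hacc hinv
    by_cases hkn : k < L.length
    · have hdrop : L.drop k = L[k] :: L.drop (k + 1) := List.drop_eq_getElem_cons hkn
      have hgd : L.getD k "" = L[k] := List.getD_eq_getElem L "" hkn
      rw [hdrop, ← hgd]
      obtain ⟨⟨m0, hm0k, hm0mark, hm0bi, hm0ch⟩, huniv⟩ := hinv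
      have hcast : ((k : Int) + 1) = ((k + 1 : Nat) : Int) := by push_cast; ring
      by_cases hb : PySem.Str.strip (L.getD k "") = ""
      · -- blank line: stay in the block
        have hchk : pvChain L m0 k := by
          intro j h1 h2
          rcases Nat.lt_or_ge j k with hlt | hge
          · exact hm0ch j h1 (by omega)
          · have : j = k := by omega
            subst this; exact Or.inl hb
        have hcov : pvCoveredB L k = true :=
          (pvCoveredB_iff L k).2 (Or.inr ⟨m0, hm0k, hm0mark, hchk⟩)
        simp only [pvInnerA, hb, if_true]
        rw [pv_set_add_not_mem acc (k : Int) (fun hx => absurd (hacc _ hx) (lt_irrefl _)), hcast]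
        have hinner := (IH (N - 1) (by omega)).2 (k + 1) bi (acc ++ [(k : Int)])
          (by omega) (by omega)
          (by intro x hx
              rcases List.mem_append.1 hx with h | h
              · have := hacc x h; push_cast; omega
              · simp at h; subst h; push_cast; omega)
          (by constructor
              · exact ⟨m0, by omega, hm0mark, hm0bi, by simpa only [Nat.add_sub_cancel] using hchk⟩
              · intro m hm1 hmark hch
                simp only [Nat.add_sub_cancel] at hch
                rcases Nat.lt_or_ge m k with hlt | hge
                · exact huniv m hlt hmark (pvChain_mono L m k (k - 1) (by omega) hch)
                · have : m = k := by omega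
                  subst this; exact absurd hb (pv_marker_nonblank _ hmark))
        rw [hinner, pvCanonFrom_cons_true L k hkn hcov, List.append_assoc]
        rfl
      · by_cases hle : pvIndent (L.getD k "") ≤ bi
        · -- block ends here: break, back to the outer loop at the same index
          simp only [pvInnerA, hb, if_false, hle, if_true]
          have houter := (IH (N - 1) (by omega)).1 k acc (by omega) (by omega) hacc
            (by intro m hm1 hmark hch
                exact ⟨hb, le_trans hle (huniv m hm1 hmark hch)⟩)
          rw [hgd, ← hdrop]
          exact houter
        · -- deeper-indented line: stay in the block
          have hgt : bi < pvIndent (L.getD k "") := by omega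
          have hchk : pvChain L m0 k := by
            intro j h1 h2
            rcases Nat.lt_or_ge j k with hlt | hge
            · exact hm0ch j h1 (by omega)
            · have : j = k := by omega
              subst this; exact Or.inr (by omega)
          have hcov : pvCoveredB L k = true :=
            (pvCoveredB_iff L k).2 (Or.inr ⟨m0, hm0k, hm0mark, hchk⟩)
          simp only [pvInnerA, hb, if_false, hle, if_false]
          rw [pv_set_add_not_mem acc (k : Int) (fun hx => absurd (hacc _ hx) (lt_irrefl _)), hcast]
          have hinner := (IH (N - 1) (by omega)).2 (k + 1) bi (acc ++ [(k : Int)])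
            (by omega) (by omega)
            (by intro x hx
                rcases List.mem_append.1 hx with h | h
                · have := hacc x h; push_cast; omega
                · simp at h; subst h; push_cast; omega)
            (by constructor
                · exact ⟨m0, by omega, hm0mark, hm0bi, by simpa only [Nat.add_sub_cancel] using hchk⟩
                · intro m hm1 hmark hch
                  simp only [Nat.add_sub_cancel] at hch
                  rcases Nat.lt_or_ge m k with hlt | hge
                  · exact huniv m hlt hmark (pvChain_mono L m k (k - 1) (by omega) hch)
                  · have : m = k := by omega
                    subst this; omega)
          rw [hinner, pvCanonFrom_cons_true L k hkn hcov, List.append_assoc]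
          rfl
    · have hke : k = L.length := by omega
      rw [List.drop_eq_nil_iff.2 (by omega)]
      simp [pvInnerA, pvCanonFrom, hke]

-- ===== VERDICT (by name: the statement is the Claim_ definition above) =====
theorem get_normalization_notes_lines_py_spec : Claim_equal_get_normalization_notes_lines_py := by
  intro lines _
  unfold Spec_get_normalization_notes_lines_py get_normalization_notes_lines_py
    get_normalization_notes_lines_py_alt
  have h := (pvMain lines (2 * lines.length)).1 0 [] (Nat.zero_le _) (by omega)
    (by intro x hx; simp at hx) (by intro m hm; omega)
  simp only [List.drop_zero, Nat.cast_zero, List.nil_append] at h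
  have hnodup : (((List.range lines.length).filter (pvCoveredB lines)).map
      (fun (i : Nat) => (i : Int))).Nodup :=
    ((List.nodup_range).filter _).map (fun a b hab => by exact_mod_cast hab)
  rw [PySem.Set.ofList_eq_self_of_nodup _ hnodup]
  unfold pvCanonFrom at h
  rw [List.range_eq_range']
  simpa using h
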